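-- pv_equiv track=rewrite | github.com/ExplodingTuna/uhdas_ladcp_terminal | system/system_summary.py | du_difference
-- ===== SOURCE A (Python) =====
-- def du_difference(old_d, new_d, show_zero = False,
--                   old_prefix = '', new_prefix = ''):
--     i0_old = len(old_prefix)
--     i0_new = len(new_prefix)
--     _old_d = dict()
--     for key, value in old_d.items():
--         _old_d[key[i0_old:]] = value
--     _new_d = dict()
--     for key, value in new_d.items():
--         _new_d[key[i0_new:]] = value
--
--     common_keys = [key for key in list(_new_d.keys()) if key in list(_old_d.keys())]
--     common_keys.sort()
--     lost_keys = [key for key in list(_old_d.keys()) if key not in list(_new_d.keys())]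
--     new_keys = [key for key in list(_new_d.keys()) if key not in list(_old_d.keys())]
--     lines = []
--     if len(new_keys) > 0:
--         new_keys.sort()
--         lines.append("New directories: %s" % ' '.join(new_keys))
--     if len(lost_keys) > 0:
--         lost_keys.sort()
--         lines.append("Deleted directories: %s" % ' '.join(lost_keys))
--     if len(common_keys) > 0:
--         s = "%s  %s" % ("Changed directories".ljust(35), " increase (k)")
--         lines.append(s)
--         for key in common_keys:
--             change = _new_d[key] - _old_d[key]
--             if show_zero or change != 0:
--                 s = "%35s %6d" % (key.ljust(35), change)
--                 lines.append(s)
--     return '\n'.join(lines) + '\n'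
-- ===== SOURCE B (Python) =====
-- def du_difference(old_d, new_d, show_zero = False,
--                   old_prefix = '', new_prefix = ''):
--     # Sort-then-merge-join: instead of A's repeated membership scans, sort both
--     # stripped key lists once and classify keys in a single two-pointer merge pass,
--     # which yields the lost/new/common lists already in sorted order.
--     _old = {}
--     for k, v in old_d.items():
--         _old[k[len(old_prefix):]] = v
--     _new = {}
--     for k, v in new_d.items():
--         _new[k[len(new_prefix):]] = v
--     ok = sorted(_old)
--     nk = sorted(_new)
--     lost, added, common = [], [], []
--     i = j = 0
--     while i < len(ok) and j < len(nk):
--         if ok[i] < nk[j]: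
--             lost.append(ok[i]); i += 1
--         elif nk[j] < ok[i]:
--             added.append(nk[j]); j += 1
--         else:
--             common.append(ok[i]); i += 1; j += 1
--     lost += ok[i:]
--     added += nk[j:]
--     lines = []
--     if added:
--         lines.append("New directories: %s" % ' '.join(added))
--     if lost:
--         lines.append("Deleted directories: %s" % ' '.join(lost))
--     if common:
--         lines.append("%s  %s" % ("Changed directories".ljust(35), " increase (k)"))
--         for k in common:
--             change = _new[k] - _old[k]
--             if show_zero or change != 0:
--                 lines.append("%s %6d" % (k.ljust(35), change))
--     return '\n'.join(lines) + '\n'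
-- ===== Notes on version B (the rewrite author's own statement) =====
-- stated objective: alternative
-- what changed: Replaces A's three membership-filter list comprehensions ('in list(...)' scans) plus separate per-list sorts by a sort-then-merge join: both stripped key lists are sorted once and a single two-pointer merge pass classifies every key as deleted, new or common, yielding the three lists already in sorted order.
import Mathlib
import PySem

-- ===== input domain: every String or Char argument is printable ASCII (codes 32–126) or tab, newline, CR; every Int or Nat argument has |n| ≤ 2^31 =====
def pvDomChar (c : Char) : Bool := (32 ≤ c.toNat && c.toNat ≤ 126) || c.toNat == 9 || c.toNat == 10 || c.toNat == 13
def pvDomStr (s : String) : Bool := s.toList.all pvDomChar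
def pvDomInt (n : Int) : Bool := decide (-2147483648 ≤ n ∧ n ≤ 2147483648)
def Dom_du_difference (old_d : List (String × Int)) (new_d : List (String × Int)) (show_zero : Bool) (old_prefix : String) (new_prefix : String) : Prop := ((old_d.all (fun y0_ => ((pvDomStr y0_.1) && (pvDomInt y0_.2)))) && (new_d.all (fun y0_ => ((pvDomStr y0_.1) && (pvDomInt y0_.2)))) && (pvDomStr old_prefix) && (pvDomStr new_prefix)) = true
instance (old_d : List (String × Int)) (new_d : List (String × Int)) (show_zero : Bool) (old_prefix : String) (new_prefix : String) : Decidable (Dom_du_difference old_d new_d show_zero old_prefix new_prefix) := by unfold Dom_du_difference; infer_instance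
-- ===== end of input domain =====

-- B replaces A's repeated membership-filter scans by a sort-then-merge join: both stripped
-- key lists are sorted once and one two-pointer merge pass classifies each key as
-- deleted / new / common (objective: alternative algorithm, identical output).

-- shared formatting helpers: str.ljust(w) and the right-justification of '%Ns' / '%Nd'
def pvLjust (s : String) (w : Nat) : String :=
  String.ofList (s.toList ++ List.replicate (w - s.toList.length) ' ')

def pvRjust (s : String) (w : Nat) : String :=
  String.ofList (List.replicate (w - s.toList.length) ' ' ++ s.toList)

-- the stripped-key dict both Pythons build: {key[i0:]: value for key, value in d.items()}
def pvStripDict (i0 : Int) (d : List (String × Int)) : PySem.Dict String Int :=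
  (PySem.Dict.ofList d).items.foldl
    (fun acc kv => acc.insert (PySem.Str.slice kv.1 (some i0) none) kv.2)
    PySem.Dict.empty

-- ===== PORT A =====
def du_difference (old_d : List (String × Int)) (new_d : List (String × Int)) (show_zero : Bool) (old_prefix : String) (new_prefix : String) : String :=
  let _old_d := pvStripDict (PySem.Str.len old_prefix) old_d
  let _new_d := pvStripDict (PySem.Str.len new_prefix) new_d
  let common_keys := PySem.List.sorted (_new_d.keys.filter (fun k => _old_d.keys.contains k)) (fun x => x)
  let lost_keys := _old_d.keys.filter (fun k => !(_new_d.keys.contains k))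
  let new_keys := _new_d.keys.filter (fun k => !(_old_d.keys.contains k))
  let lines : List String := []
  let lines := if new_keys.length > 0 then
      lines ++ ["New directories: " ++ PySem.Str.join " " (PySem.List.sorted new_keys (fun x => x))]
    else lines
  let lines := if lost_keys.length > 0 then
      lines ++ ["Deleted directories: " ++ PySem.Str.join " " (PySem.List.sorted lost_keys (fun x => x))]
    else lines
  let lines := if common_keys.length > 0 then
      common_keys.foldl (fun ls key =>
          let change := _new_d.getD key 0 - _old_d.getD key 0
          if show_zero || !(change == 0) then
            ls ++ [pvRjust (pvLjust key 35) 35 ++ " " ++ pvRjust (PySem.Int.toStr change) 6]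
          else ls)
        (lines ++ [pvLjust "Changed directories" 35 ++ "  " ++ " increase (k)"])
    else lines
  PySem.Str.join "\n" lines ++ "\n"

-- ===== PORT B =====
-- the two-pointer merge pass of Source B, as structural recursion on the two sorted lists:
-- returns (lost, added, common)
def pvMerge : List String → List String → List String × List String × List String
  | [], ys => ([], ys, [])
  | x :: xs, [] => (x :: xs, [], [])
  | x :: xs, y :: ys =>
    if x < y then
      let r := pvMerge xs (y :: ys); (x :: r.1, r.2.1, r.2.2)
    else if y < x then
      let r := pvMerge (x :: xs) ys; (r.1, y :: r.2.1, r.2.2)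
    else
      let r := pvMerge xs ys; (r.1, r.2.1, x :: r.2.2)
termination_by xs ys => xs.length + ys.length

def du_difference_alt (old_d : List (String × Int)) (new_d : List (String × Int)) (show_zero : Bool) (old_prefix : String) (new_prefix : String) : String :=
  let _old := pvStripDict (PySem.Str.len old_prefix) old_d
  let _new := pvStripDict (PySem.Str.len new_prefix) new_d
  let ok := PySem.List.sorted _old.keys (fun x => x)
  let nk := PySem.List.sorted _new.keys (fun x => x)
  let cls := pvMerge ok nk
  let lines : List String := []
  let lines := if cls.2.1 ≠ [] then
      lines ++ ["New directories: " ++ PySem.Str.join " " cls.2.1]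
    else lines
  let lines := if cls.1 ≠ [] then
      lines ++ ["Deleted directories: " ++ PySem.Str.join " " cls.1]
    else lines
  let lines := if cls.2.2 ≠ [] then
      cls.2.2.foldl (fun ls k =>
          let change := _new.getD k 0 - _old.getD k 0
          if show_zero || !(change == 0) then
            ls ++ [pvLjust k 35 ++ " " ++ pvRjust (PySem.Int.toStr change) 6]
          else ls)
        (lines ++ [pvLjust "Changed directories" 35 ++ "  " ++ " increase (k)"])
    else lines
  PySem.Str.join "\n" lines ++ "\n"

-- ===== PRECONDITION & SPEC =====
def Spec_du_difference (old_d : List (String × Int)) (new_d : List (String × Int)) (show_zero : Bool) (old_prefix : String) (new_prefix : String) (out : String) : Prop := out = du_difference_alt old_d new_d show_zero old_prefix new_prefix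
instance (old_d : List (String × Int)) (new_d : List (String × Int)) (show_zero : Bool) (old_prefix : String) (new_prefix : String) (out : String) : Decidable (Spec_du_difference old_d new_d show_zero old_prefix new_prefix out) := by unfold Spec_du_difference; infer_instance

-- ===== CLAIM (what is proved, stated in full; the proofs are below) =====
def Claim_equal_du_difference : Prop := ∀ (old_d : List (String × Int)) (new_d : List (String × Int)) (show_zero : Bool) (old_prefix : String) (new_prefix : String), Dom_du_difference old_d new_d show_zero old_prefix new_prefix → Spec_du_difference old_d new_d show_zero old_prefix new_prefix (du_difference old_d new_d show_zero old_prefix new_prefix)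

-- ===== LEMMAS AND PROOFS =====

-- '%35s' applied to a string already left-justified to width 35 is the identity
theorem pvRjust_pvLjust (s : String) : pvRjust (pvLjust s 35) 35 = pvLjust s 35 := by
  unfold pvLjust pvRjust
  have h : 35 - ((String.ofList (s.toList ++ List.replicate (35 - s.toList.length) ' ')).toList.length) = 0 := by
    simp; omega
  rw [h]
  simp

theorem pvStripDict_nodup_keys (i0 : Int) (d : List (String × Int)) :
    (pvStripDict i0 d).keys.Nodup := by
  unfold pvStripDict
  exact PySem.Dict.nodup_keys_foldl_insert_key _ _ _ _ (by simp [PySem.Dict.keys_empty])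

-- a ≤-sorted list without duplicates is strictly sorted
theorem pairwise_lt_of_nodup {l : List String}
    (h1 : l.Pairwise (· ≤ ·)) (h2 : l.Nodup) : l.Pairwise (· < ·) :=
  (h1.and h2).imp (fun h => lt_of_le_of_ne h.1 h.2)

-- the merge pass over strictly sorted lists computes the three membership filters
theorem pvMerge_eq_filters (xs ys : List String)
    (hx : xs.Pairwise (· < ·)) (hy : ys.Pairwise (· < ·)) :
    pvMerge xs ys = (xs.filter (fun k => !(ys.contains k)),
                     ys.filter (fun k => !(xs.contains k)),
                     xs.filter (fun k => ys.contains k)) := by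
  fun_induction pvMerge xs ys with
  | case1 ys => simp
  | case2 x xs => simp
  | case3 x xs y ys hlt r ih =>
    have hx' := List.pairwise_cons.mp hx
    have hy' := List.pairwise_cons.mp hy
    -- x < every element of y :: ys, hence x ∉ y :: ys
    have hxny : (y :: ys).contains x = false := by
      simp only [List.contains_eq_mem, decide_eq_false_iff_not]
      intro hmem
      rcases List.mem_cons.mp hmem with h | h
      · exact absurd h (ne_of_lt hlt)
      · exact absurd (lt_trans hlt (hy'.1 x h)) (lt_irrefl _)
    -- every element of y :: ys differs from x
    have hzs : ∀ z ∈ y :: ys, ((x :: xs).contains z) = (xs.contains z) := by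
      intro z hz
      have hxz : x < z := by
        rcases List.mem_cons.mp hz with h | h
        · exact h ▸ hlt
        · exact lt_trans hlt (hy'.1 z h)
      simp [List.contains_eq_mem, List.mem_cons, Ne.symm (ne_of_lt hxz)]
    rw [show r = pvMerge xs (y :: ys) from rfl, ih hx'.2 hy]
    refine Prod.ext ?_ (Prod.ext ?_ ?_) <;> dsimp only
    · exact (List.filter_cons_of_pos (by rw [hxny]; rfl)).symm
    · exact (List.filter_congr (fun z hz => congrArg Bool.not (hzs z hz))).symm
    · exact (List.filter_cons_of_neg (by simpa using hxny)).symm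
  | case4 x xs y ys hlt hlt2 r ih =>
    have hx' := List.pairwise_cons.mp hx
    have hy' := List.pairwise_cons.mp hy
    have hynx : (x :: xs).contains y = false := by
      simp only [List.contains_eq_mem, decide_eq_false_iff_not]
      intro hmem
      rcases List.mem_cons.mp hmem with h | h
      · exact absurd h (ne_of_lt hlt2)
      · exact absurd (lt_trans hlt2 (hx'.1 y h)) (lt_irrefl _)
    have hzs : ∀ z ∈ x :: xs, ((y :: ys).contains z) = (ys.contains z) := by
      intro z hz
      have hyz : y < z := by
        rcases List.mem_cons.mp hz with h | h
        · exact h ▸ hlt2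
        · exact lt_trans hlt2 (hx'.1 z h)
      simp [List.contains_eq_mem, List.mem_cons, Ne.symm (ne_of_lt hyz)]
    rw [show r = pvMerge (x :: xs) ys from rfl, ih hx hy'.2]
    refine Prod.ext ?_ (Prod.ext ?_ ?_) <;> dsimp only
    · exact (List.filter_congr (fun z hz => congrArg Bool.not (hzs z hz))).symm
    · exact (List.filter_cons_of_pos (by rw [hynx]; rfl)).symm
    · exact (List.filter_congr (fun z hz => hzs z hz)).symm
  | case5 x xs y ys hlt hlt2 r ih =>
    have hxy : x = y := le_antisymm (not_lt.mp hlt2) (not_lt.mp hlt)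
    subst hxy
    have hx' := List.pairwise_cons.mp hx
    have hy' := List.pairwise_cons.mp hy
    have hxin : ((x :: ys).contains x) = true := by simp
    -- tails: x is below every tail element, so membership in the cons equals membership in the tail
    have hzsx : ∀ z ∈ xs, ((x :: ys).contains z) = (ys.contains z) := by
      intro z hz
      simp [List.contains_eq_mem, List.mem_cons, Ne.symm (ne_of_lt (hx'.1 z hz))]
    have hzsy : ∀ z ∈ ys, ((x :: xs).contains z) = (xs.contains z) := by
      intro z hz
      simp [List.contains_eq_mem, List.mem_cons, Ne.symm (ne_of_lt (hy'.1 z hz))]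
    rw [show r = pvMerge xs ys from rfl, ih hx'.2 hy'.2]
    refine Prod.ext ?_ (Prod.ext ?_ ?_) <;> dsimp only
    · rw [List.filter_cons_of_neg (by simp)]
      exact (List.filter_congr (fun z hz => congrArg Bool.not (hzsx z hz))).symm
    · rw [List.filter_cons_of_neg (by simp)]
      exact (List.filter_congr (fun z hz => congrArg Bool.not (hzsy z hz))).symm
    · rw [List.filter_cons_of_pos hxin]
      exact congrArg (x :: ·) (List.filter_congr (fun z hz => hzsx z hz)).symm

-- sorting commutes with filtering (for a duplicate-free list, via strict sortedness)
theorem sorted_filter (xs : List String) (p : String → Bool) (hnd : xs.Nodup) :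
    PySem.List.sorted (xs.filter p) (fun x => x)
      = (PySem.List.sorted xs (fun x => x)).filter p := by
  apply PySem.List.sorted_eq_of_perm_of_pairwise_lt
  · exact (PySem.List.sorted_perm xs (fun x => x) false).filter p
  · exact (pairwise_lt_of_nodup (PySem.List.sorted_pairwise xs (fun x => x))
      ((PySem.List.sorted_perm xs (fun x => x) false).nodup_iff.mpr hnd)).filter p

-- membership tests against a sorted copy are membership tests against the original
theorem contains_sorted (xs : List String) (k : String) :
    (PySem.List.sorted xs (fun x => x)).contains k = xs.contains k := by
  by_cases h : k ∈ xs <;>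
    simp [List.contains_eq_mem, PySem.List.mem_sorted, h]

-- the heart of the equivalence, over arbitrary stripped dicts with nodup keys
theorem core (O N : PySem.Dict String Int) (hO : O.keys.Nodup) (hN : N.keys.Nodup) (show_zero : Bool) :
    (let common_keys := PySem.List.sorted (N.keys.filter (fun k => O.keys.contains k)) (fun x => x)
     let lost_keys := O.keys.filter (fun k => !(N.keys.contains k))
     let new_keys := N.keys.filter (fun k => !(O.keys.contains k))
     let lines : List String := []
     let lines := if new_keys.length > 0 then
         lines ++ ["New directories: " ++ PySem.Str.join " " (PySem.List.sorted new_keys (fun x => x))]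
       else lines
     let lines := if lost_keys.length > 0 then
         lines ++ ["Deleted directories: " ++ PySem.Str.join " " (PySem.List.sorted lost_keys (fun x => x))]
       else lines
     let lines := if common_keys.length > 0 then
         common_keys.foldl (fun ls key =>
             let change := N.getD key 0 - O.getD key 0
             if show_zero || !(change == 0) then
               ls ++ [pvRjust (pvLjust key 35) 35 ++ " " ++ pvRjust (PySem.Int.toStr change) 6]
             else ls)
           (lines ++ [pvLjust "Changed directories" 35 ++ "  " ++ " increase (k)"])
       else lines
     PySem.Str.join "\n" lines ++ "\n")
    =
    (let ok := PySem.List.sorted O.keys (fun x => x)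
     let nk := PySem.List.sorted N.keys (fun x => x)
     let cls := pvMerge ok nk
     let lines : List String := []
     let lines := if cls.2.1 ≠ [] then
         lines ++ ["New directories: " ++ PySem.Str.join " " cls.2.1]
       else lines
     let lines := if cls.1 ≠ [] then
         lines ++ ["Deleted directories: " ++ PySem.Str.join " " cls.1]
       else lines
     let lines := if cls.2.2 ≠ [] then
         cls.2.2.foldl (fun ls k =>
             let change := N.getD k 0 - O.getD k 0
             if show_zero || !(change == 0) then
               ls ++ [pvLjust k 35 ++ " " ++ pvRjust (PySem.Int.toStr change) 6]
             else ls)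
           (lines ++ [pvLjust "Changed directories" 35 ++ "  " ++ " increase (k)"])
       else lines
     PySem.Str.join "\n" lines ++ "\n") := by
  have hOs : (PySem.List.sorted O.keys (fun x => x)).Nodup :=
    (PySem.List.sorted_perm O.keys (fun x => x) false).nodup_iff.mpr hO
  have hNs : (PySem.List.sorted N.keys (fun x => x)).Nodup :=
    (PySem.List.sorted_perm N.keys (fun x => x) false).nodup_iff.mpr hN
  have hmerge := pvMerge_eq_filters _ _
    (pairwise_lt_of_nodup (PySem.List.sorted_pairwise O.keys (fun x => x)) hOs)
    (pairwise_lt_of_nodup (PySem.List.sorted_pairwise N.keys (fun x => x)) hNs)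
  -- normalise the merge components to filters over the ORIGINAL key lists
  have hlost : (pvMerge (PySem.List.sorted O.keys (fun x => x)) (PySem.List.sorted N.keys (fun x => x))).1
      = PySem.List.sorted (O.keys.filter (fun k => !(N.keys.contains k))) (fun x => x) := by
    rw [hmerge, sorted_filter _ _ hO]
    exact List.filter_congr (fun k _ => by rw [contains_sorted])
  have hnew : (pvMerge (PySem.List.sorted O.keys (fun x => x)) (PySem.List.sorted N.keys (fun x => x))).2.1
      = PySem.List.sorted (N.keys.filter (fun k => !(O.keys.contains k))) (fun x => x) := by
    rw [hmerge, sorted_filter _ _ hN]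
    exact List.filter_congr (fun k _ => by rw [contains_sorted])
  have hcommon : (pvMerge (PySem.List.sorted O.keys (fun x => x)) (PySem.List.sorted N.keys (fun x => x))).2.2
      = PySem.List.sorted (N.keys.filter (fun k => O.keys.contains k)) (fun x => x) := by
    rw [hmerge]
    apply Eq.symm
    apply PySem.List.sorted_eq_of_perm_of_pairwise_lt
    · rw [List.perm_ext_iff_of_nodup
        ((PySem.List.sorted_perm O.keys (fun x => x) false).filter _ |>.nodup_iff.mpr (hO.filter _))
        (hN.filter _)]
      intro a
      simp [List.mem_filter, PySem.List.mem_sorted, List.contains_eq_mem, and_comm]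
    · exact (pairwise_lt_of_nodup (PySem.List.sorted_pairwise O.keys (fun x => x)) hOs).filter _
  simp only [hlost, hnew, hcommon, pvRjust_pvLjust,
    ne_eq, ← PySem.List.sorted_eq_nil_iff (rev := false) (key := fun x : String => x),
    ← List.length_pos_iff, PySem.List.length_sorted, PySem.List.sorted_sorted]

theorem du_difference_eq (old_d : List (String × Int)) (new_d : List (String × Int)) (show_zero : Bool) (old_prefix : String) (new_prefix : String) :
    du_difference old_d new_d show_zero old_prefix new_prefix
      = du_difference_alt old_d new_d show_zero old_prefix new_prefix :=
  core (pvStripDict (PySem.Str.len old_prefix) old_d)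
       (pvStripDict (PySem.Str.len new_prefix) new_d)
       (pvStripDict_nodup_keys _ _) (pvStripDict_nodup_keys _ _) show_zero

-- ===== VERDICT (by name: the statement is the Claim_ definition above) =====
theorem du_difference_spec : Claim_equal_du_difference := by
  intro old_d new_d show_zero old_prefix new_prefix _
  unfold Spec_du_difference
  exact du_difference_eq old_d new_d show_zero old_prefix new_prefix
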